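-- pv_equiv track=rewrite | github.com/BattleForged/leetcode | 42.py | get
-- ===== SOURCE A (Python) =====
-- def get(height):
--     begin = 0
--     rain = []
--     for h in height:
--         if h >= begin:
--             begin = h
--             rain.append(0)
--         else:
--             rain.append(begin - h)
--     return rain
-- ===== SOURCE B (Python) =====
-- def get(height):
--     # Divide and conquer: solve(seg, m) returns (answers for seg given that
--     # m = max(0, elements before seg), max(m, seg)).
--     def solve(seg, m):
--         if not seg:
--             return [], m
--         if len(seg) == 1:
--             t = max(m, seg[0])
--             return [t - seg[0]], t
--         mid = len(seg) // 2
--         L, ml = solve(seg[:mid], m)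
--         R, mr = solve(seg[mid:], ml)
--         return L + R, mr
--     return solve(height, 0)[0]
-- ===== Notes on version B (the rewrite author's own statement) =====
-- stated objective: alternative
-- what changed: Replaces A's left-to-right running-max loop with a divide-and-conquer recursion that splits the list in half and returns (answers, new max) for each segment, threading the left half's max into the right half.
import Mathlib
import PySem

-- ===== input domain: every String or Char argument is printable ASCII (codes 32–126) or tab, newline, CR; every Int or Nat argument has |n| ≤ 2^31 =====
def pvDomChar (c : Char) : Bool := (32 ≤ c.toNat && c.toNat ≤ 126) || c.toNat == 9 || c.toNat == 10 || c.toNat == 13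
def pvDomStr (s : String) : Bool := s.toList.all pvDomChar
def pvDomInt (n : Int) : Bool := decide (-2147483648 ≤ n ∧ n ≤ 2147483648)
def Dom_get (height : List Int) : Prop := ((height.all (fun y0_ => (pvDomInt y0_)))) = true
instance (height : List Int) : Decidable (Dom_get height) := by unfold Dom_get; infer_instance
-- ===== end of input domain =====

-- B replaces A's left-to-right running-max loop by a divide-and-conquer recursion on halves (alternative decomposition; not faster).

-- ===== PORT A =====
-- literal port of A's loop: state (begin, rain), branch order preserved
def get (height : List Int) : List Int :=
  (height.foldl
    (fun (s : Int × List Int) h =>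
      if h ≥ s.1 then (h, s.2 ++ [0]) else (s.1, s.2 ++ [s.1 - h]))
    (0, [])).2

-- ===== PORT B =====
-- Source B's solve(seg, m): answers for seg given m = max of everything left of seg, and max(m, seg)
def getSolve (seg : List Int) (m : Int) : List Int × Int :=
  match seg with
  | [] => ([], m)
  | [h] => ([max m h - h], max m h)
  | a :: b :: t =>
    let mid := (a :: b :: t).length / 2
    let L := getSolve ((a :: b :: t).take mid) m
    let R := getSolve ((a :: b :: t).drop mid) L.2
    (L.1 ++ R.1, R.2)
termination_by seg.length
decreasing_by
  · simp [List.length_take]; omega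
  · simp; omega

def get_alt (height : List Int) : List Int := (getSolve height 0).1

-- ===== PRECONDITION & SPEC =====
def Spec_get (height : List Int) (out : List Int) : Prop := out = get_alt height
instance (height : List Int) (out : List Int) : Decidable (Spec_get height out) := by unfold Spec_get; infer_instance

-- ===== CLAIM (what is proved, stated in full; the proofs are below) =====
def Claim_equal_get : Prop := ∀ (height : List Int), Dom_get height → Spec_get height (get height)

-- ===== LEMMAS AND PROOFS =====
-- the common sequential characterisation: running max from seed m, element-wise max-minus-height
def runSpec (seg : List Int) (m : Int) : List Int :=
  match seg with
  | [] => []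
  | h :: t => (max m h - h) :: runSpec t (max m h)

theorem runSpec_append (s t : List Int) (m : Int) :
    runSpec (s ++ t) m = runSpec s m ++ runSpec t (s.foldl max m) := by
  induction s generalizing m with
  | nil => simp [runSpec]
  | cons a s ih => simp [runSpec, ih]

theorem getSolve_eq_aux (n : Nat) : ∀ (seg : List Int), seg.length = n → ∀ (m : Int),
    getSolve seg m = (runSpec seg m, seg.foldl max m) := by
  induction n using Nat.strong_induction_on with
  | _ n ih =>
    intro seg hlen m
    match seg with
    | [] => simp [getSolve, runSpec]
    | [h] => simp [getSolve, runSpec]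
    | a :: b :: t =>
      have h1 : (List.take ((a :: b :: t).length / 2) (a :: b :: t)).length < n := by
        subst hlen; simp [List.length_take]; omega
      have h2 : (List.drop ((a :: b :: t).length / 2) (a :: b :: t)).length < n := by
        subst hlen; simp; omega
      have e1 := ih _ h1 (List.take ((a :: b :: t).length / 2) (a :: b :: t)) rfl m
      have e2 := ih _ h2 (List.drop ((a :: b :: t).length / 2) (a :: b :: t)) rfl
        (List.foldl max m (List.take ((a :: b :: t).length / 2) (a :: b :: t)))
      rw [getSolve]
      simp only [e1, e2]
      conv_rhs => rw [← List.take_append_drop ((a :: b :: t).length / 2) (a :: b :: t)]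
      rw [runSpec_append, List.foldl_append]

theorem getSolve_eq (seg : List Int) (m : Int) :
    getSolve seg m = (runSpec seg m, seg.foldl max m) :=
  getSolve_eq_aux seg.length seg rfl m

theorem get_loop_eq (l : List Int) (b : Int) (r : List Int) :
    (l.foldl
      (fun (s : Int × List Int) h =>
        if h ≥ s.1 then (h, s.2 ++ [0]) else (s.1, s.2 ++ [s.1 - h]))
      (b, r)).2 = r ++ runSpec l b := by
  induction l generalizing b r with
  | nil => simp [runSpec]
  | cons h t ih =>
    simp only [List.foldl, runSpec]
    by_cases hb : h ≥ b
    · have hm : max b h = h := max_eq_right hb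
      simp [hb, ih]
    · have hm : max b h = b := max_eq_left (le_of_lt (lt_of_not_ge hb))
      simp [hb, ih, le_of_lt (lt_of_not_ge hb)]

-- ===== VERDICT (by name: the statement is the Claim_ definition above) =====
theorem get_spec : Claim_equal_get := by
  intro height _
  show get height = get_alt height
  unfold _root_.get get_alt
  rw [getSolve_eq]
  simpa using get_loop_eq height 0 []
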